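-- pv_equiv track=rewrite | github.com/balker0322/advent_of_code | 2023_day_12/part2.py | get_all_valid_pos
-- ===== SOURCE A (Python) =====
-- def is_fit(data, info):
--     if info[0]>len(data):
--         return False
--     for i in range(info[0]):
--         if data[i]=='.':
--             return False
--     if len(data)==info[0]:
--         return True
--     if data[info[0]]=='#':
--         return False
--     return True
--
-- def get_all_valid_pos(data, info):
--
--     for i in range(len(data)):
--         if '#' in data[:i]:
--             break
--         temp_data = list(data)
--         for j in range(info[0]):
--             if i+j>len(data)-1:
--                 break
--             if data[i+j]=='?':
--                 temp_data[i+j]='#'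
--         temp_data = ''.join(temp_data).replace('?', '.')
--         if not is_fit(temp_data[i:], info):
--             continue
--         yield data[i+info[0]+1:], info[1:]
-- ===== SOURCE B (Python) =====
-- def get_all_valid_pos(data, info):
--     k = info[0]
--     n = len(data)
--     first_hash = data.find('#')
--     limit = n - 1 if first_hash == -1 else first_hash
--     dots = [0] * (n + 1)
--     for idx, ch in enumerate(data):
--         dots[idx + 1] = dots[idx] + (ch == '.')
--     for i in range(limit + 1):
--         end = i + k
--         if end <= n and dots[end] == dots[i] and (end == n or data[end] != '#'):
--             yield data[end + 1:], info[1:]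
-- ===== Notes on version B (the rewrite author's own statement) =====
-- stated objective: faster
-- what changed: Instead of materialising a mutated copy of the whole string for every start position and re-scanning it with is_fit, B precomputes the first '#' position and a prefix-count array of '.' characters once, then checks each candidate start in O(1).
-- outside the precondition, e.g. on get_all_valid_pos('?.', [-1]): A returns [('?.', []), ('.', [])], B returns [('.', [])]; on get_all_valid_pos('ab', [-2]): A raises IndexError, B returns [('b', []), ('ab', [])]
import Mathlib
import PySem

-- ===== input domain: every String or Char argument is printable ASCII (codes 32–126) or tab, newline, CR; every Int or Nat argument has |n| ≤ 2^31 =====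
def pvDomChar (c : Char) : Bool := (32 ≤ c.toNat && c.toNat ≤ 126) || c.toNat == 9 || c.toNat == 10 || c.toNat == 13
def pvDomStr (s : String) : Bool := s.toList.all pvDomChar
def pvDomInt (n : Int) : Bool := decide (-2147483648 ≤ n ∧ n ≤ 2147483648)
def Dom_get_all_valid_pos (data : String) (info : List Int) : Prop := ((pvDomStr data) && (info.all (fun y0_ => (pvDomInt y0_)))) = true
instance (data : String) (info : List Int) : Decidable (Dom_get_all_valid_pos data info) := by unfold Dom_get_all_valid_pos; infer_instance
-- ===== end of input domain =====

-- B replaces A's per-position string mutation + is_fit rescan by one precomputed first-'#'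
-- position and a prefix-count of '.' characters, giving an O(1) check per start position.

-- ===== PORT A =====
-- inner loop 'for j in range(info[0]): if i+j>len(data)-1: break; …' (j counts up, Int compare kept)
def pvMutLoop (d : List Char) (i : Nat) : Nat → List Char → Nat → List Char
  | _, t, 0 => t
  | j, t, fuel+1 =>
    if (i + j : Int) > (d.length : Int) - 1 then t
    else pvMutLoop d i (j+1) (if d.getD (i+j) ' ' = '?' then t.set (i+j) '#' else t) fuel

-- 'for i in range(info[0]): if data[i]=='.': return False'
def pvFitLoop (d : List Char) : Nat → Nat → Bool
  | _, 0 => true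
  | j, fuel+1 => if d.getD j ' ' = '.' then false else pvFitLoop d (j+1) fuel

def pvIsFit (d : List Char) (info : List Int) : Bool :=
  let k := (PySem.List.pyGet? info 0).getD 0
  if k > (d.length : Int) then false
  else if pvFitLoop d 0 k.toNat = false then false
  else if (d.length : Int) = k then true
  else if d.getD k.toNat ' ' = '#' then false
  else true

def pvALoop (d : List Char) (info : List Int) : List Nat → List (String × List Int)
  | [] => []
  | i :: rest =>
    if PySem.Chars.isIn ['#'] (d.take i) then []
    else
      let k := (PySem.List.pyGet? info 0).getD 0
      let temp := pvMutLoop d i 0 d k.toNat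
      let temp2 := temp.map (fun c => if c = '?' then '.' else c)  -- .replace('?', '.')
      if pvIsFit (temp2.drop i) info then
        (String.ofList (PySem.List.slice d (some ((i : Int) + k + 1)) none), info.tail)
          :: pvALoop d info rest
      else pvALoop d info rest

def get_all_valid_pos (data : String) (info : List Int) : List (String × List Int) :=
  pvALoop data.toList info (List.range data.toList.length)

-- ===== PORT B =====
def get_all_valid_pos_alt (data : String) (info : List Int) : List (String × List Int) :=
  let d := data.toList
  let k := (PySem.List.pyGet? info 0).getD 0
  let n := d.length
  let fh := PySem.Str.find data "#"
  let limit : Int := if fh = -1 then (n : Int) - 1 else fh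
  let dots := List.scanl (fun a c => a + (if c = '.' then 1 else 0)) (0 : Nat) d  -- prefix counts of '.'
  (List.range (limit + 1).toNat).filterMap (fun (i : Nat) =>
    let e : Int := (i : Int) + k
    if e ≤ (n : Int) ∧ dots.getD e.toNat 0 = dots.getD i 0 ∧ (e = (n : Int) ∨ d.getD e.toNat ' ' ≠ '#')
    then some (String.ofList (d.drop (e + 1).toNat), info.tail) else none)

-- ===== PRECONDITION & SPEC =====
-- Pre_ excludes empty info (info[0] raises IndexError) and a negative first group size, which is
-- outside the function's natural domain (a spring-group length): there A either raises IndexError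
-- from negative indexing or yields accidental values via negative-index wraparound.
def Pre_get_all_valid_pos (data : String) (info : List Int) : Prop :=
  info ≠ [] ∧ 0 ≤ info.headI
instance (data : String) (info : List Int) : Decidable (Pre_get_all_valid_pos data info) := by
  unfold Pre_get_all_valid_pos; infer_instance

def pvWitness_get_all_valid_pos : String × List Int := ("?.#?", [1, 2])

def Spec_get_all_valid_pos (data : String) (info : List Int) (out : List (String × List Int)) : Prop := out = get_all_valid_pos_alt data info
instance (data : String) (info : List Int) (out : List (String × List Int)) : Decidable (Spec_get_all_valid_pos data info out) := by unfold Spec_get_all_valid_pos; infer_instance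

-- ===== CLAIM (what is proved, stated in full; the proofs are below) =====
def Claim_equal_get_all_valid_pos : Prop := ∀ (data : String) (info : List Int), Dom_get_all_valid_pos data info → Pre_get_all_valid_pos data info → Spec_get_all_valid_pos data info (get_all_valid_pos data info)


-- ===== LEMMAS AND PROOFS =====

-- proof-only helper: the loop body of pvALoop as an Option-valued step
def pvStepA (d : List Char) (info : List Int) (i : Nat) : Option (String × List Int) :=
  let k := (PySem.List.pyGet? info 0).getD 0
  let temp := pvMutLoop d i 0 d k.toNat
  let temp2 := temp.map (fun c => if c = '?' then '.' else c)
  if pvIsFit (temp2.drop i) info then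
    some (String.ofList (PySem.List.slice d (some ((i : Int) + k + 1)) none), info.tail)
  else none

-- proof-only helper: the loop body of pvALoop_alt (B) as an Option-valued step
def pvStepB (d : List Char) (info : List Int) (k : Int) (dots : List Nat) (i : Nat) : Option (String × List Int) :=
  let e : Int := (i : Int) + k
  let n := d.length
  if e ≤ (n : Int) ∧ dots.getD e.toNat 0 = dots.getD i 0 ∧ (e = (n : Int) ∨ d.getD e.toNat ' ' ≠ '#')
  then some (String.ofList (d.drop (e + 1).toNat), info.tail) else none

theorem pvMutLoop_length (d : List Char) (i : Nat) :
    ∀ (fuel j : Nat) (t : List Char), (pvMutLoop d i j t fuel).length = t.length := by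
  intro fuel
  induction fuel with
  | zero => intro j t; simp [pvMutLoop]
  | succ f ih =>
    intro j t
    simp only [pvMutLoop]
    split
    · rfl
    · rw [ih]; split
      · simp
      · rfl

theorem pvMutLoop_getD (d : List Char) (i : Nat) :
    ∀ (fuel j : Nat) (t : List Char), t.length = d.length → ∀ p : Nat,
      (pvMutLoop d i j t fuel).getD p ' ' =
        if i + j ≤ p ∧ p < i + j + fuel ∧ p < d.length ∧ d.getD p ' ' = '?' then '#'
        else t.getD p ' ' := by
  intro fuel
  induction fuel with
  | zero =>
    intro j t ht p
    simp only [pvMutLoop]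
    split
    · rename_i hc; obtain ⟨h1, h2, -⟩ := hc; omega
    · rfl
  | succ f ih =>
    intro j t ht p
    simp only [pvMutLoop]
    split
    · rename_i hbr
      split
      · rename_i hc; obtain ⟨h1, h2, h3, -⟩ := hc; omega
      · rfl
    · rename_i hbr
      have hjn : i + j < d.length := by omega
      have ht' : (if d.getD (i+j) ' ' = '?' then t.set (i+j) '#' else t).length = d.length := by
        split
        · simp [ht]
        · exact ht
      rw [ih (j+1) _ ht' p]
      by_cases hp : p = i + j
      · subst hp
        rw [if_neg (by omega)]
        by_cases hq : d.getD (i+j) ' ' = '?'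
        · rw [if_pos hq, if_pos ⟨le_refl _, by omega, by omega, hq⟩]
          simp [List.getD_eq_getElem?_getD, ht ▸ hjn]
        · rw [if_neg hq, if_neg (by rintro ⟨-, -, -, h⟩; exact hq h)]
      · have hset : (if d.getD (i+j) ' ' = '?' then t.set (i+j) '#' else t).getD p ' ' = t.getD p ' ' := by
          split
          · simp [List.getD_eq_getElem?_getD, List.getElem?_set_ne (fun h => hp h.symm)]
          · rfl
        rw [hset]
        by_cases hc : i + j ≤ p ∧ p < i + j + (f+1) ∧ p < d.length ∧ d.getD p ' ' = '?'
        · rw [if_pos hc, if_pos ⟨by omega, by omega, hc.2.2⟩]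
        · rw [if_neg hc, if_neg (by rintro ⟨h1, h2, h3, h4⟩; exact hc ⟨by omega, by omega, h3, h4⟩)]

theorem pvFitLoop_iff (d : List Char) :
    ∀ (fuel j : Nat), pvFitLoop d j fuel = true ↔ ∀ q < fuel, d.getD (j + q) ' ' ≠ '.' := by
  intro fuel
  induction fuel with
  | zero => intro j; simp [pvFitLoop]
  | succ f ih =>
    intro j
    simp only [pvFitLoop]
    split
    · rename_i hdot
      refine iff_of_false (by simp) ?_
      intro hall
      exact hall 0 (Nat.succ_pos f) (by simpa using hdot)
    · rename_i hdot
      rw [ih (j+1)]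
      constructor
      · intro hall q hq
        rcases Nat.eq_zero_or_pos q with h0 | hpos
        · subst h0; simpa using hdot
        · have := hall (q - 1) (by omega)
          convert this using 2
          omega
      · intro hall q hq
        have := hall (q + 1) (by omega)
        convert this using 2
        omega

theorem pvScanl_getD (l : List Char) :
    ∀ (a p : Nat), p ≤ l.length →
      (List.scanl (fun a c => a + (if c = '.' then 1 else 0)) a l).getD p 0 =
        a + (l.take p).countP (fun c => decide (c = '.')) := by
  induction l with
  | nil =>
    intro a p hp
    have : p = 0 := by simpa using hp
    subst this
    simp
  | cons c cs ih =>
    intro a p hp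
    cases p with
    | zero => simp
    | succ q =>
      simp only [List.scanl_cons, List.take_succ_cons, List.countP_cons]
      have : (List.getD (a :: List.scanl (fun a c => a + (if c = '.' then 1 else 0)) (a + (if c = '.' then 1 else 0)) cs) (q+1) 0) = (List.scanl (fun a c => a + (if c = '.' then 1 else 0)) (a + (if c = '.' then 1 else 0)) cs).getD q 0 := by
        simp [List.getD_eq_getElem?_getD]
      rw [this, ih _ q (by simpa using hp)]
      by_cases hc : c = '.' <;> simp [hc] <;> omega

theorem pvCount_take_iff (d : List Char) (i K : Nat) (h : i + K ≤ d.length) :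
    ((d.take (i + K)).countP (fun c => decide (c = '.')) =
      (d.take i).countP (fun c => decide (c = '.'))) ↔
    ∀ q < K, d.getD (i + q) ' ' ≠ '.' := by
  rw [show i + K = i + K from rfl, List.take_add, List.countP_append]
  have hlen : ((d.drop i).take K).length = K := by
    simp; omega
  constructor
  · intro hcount q hq
    have hzero : ((d.drop i).take K).countP (fun c => decide (c = '.')) = 0 := by omega
    rw [List.countP_eq_zero] at hzero
    have hmem : d.getD (i + q) ' ' ∈ (d.drop i).take K := by
      have hq' : q < ((d.drop i).take K).length := by omega
      have : ((d.drop i).take K)[q] = d.getD (i + q) ' ' := by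
        rw [List.getElem_take, List.getElem_drop]
        simp [List.getD_eq_getElem?_getD, List.getElem?_eq_getElem (by omega : i + q < d.length)]
      exact this ▸ List.getElem_mem hq'
    have := hzero _ hmem
    simp at this
    exact this
  · intro hall
    have hzero : ((d.drop i).take K).countP (fun c => decide (c = '.')) = 0 := by
      rw [List.countP_eq_zero]
      intro a ha
      rw [List.mem_iff_getElem] at ha
      obtain ⟨q, hq, rfl⟩ := ha
      have hq' : q < K := by omega
      have : ((d.drop i).take K)[q] = d.getD (i + q) ' ' := by
        rw [List.getElem_take, List.getElem_drop]
        simp [List.getD_eq_getElem?_getD, List.getElem?_eq_getElem (by omega : i + q < d.length)]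
      rw [this]
      simpa using hall q hq'
    omega

theorem pvIsIn_singleton (c : Char) (l : List Char) :
    PySem.Chars.isIn [c] l = true ↔ c ∈ l := by
  rw [PySem.Chars.isIn_iff_infix]
  constructor
  · rintro ⟨s, t, rfl⟩
    simp
  · intro hm
    obtain ⟨s, t, rfl⟩ := List.append_of_mem hm
    exact ⟨s, t, by simp⟩

theorem pvPrefix_drop (d : List Char) (q : Nat) (hq : q < d.length) :
    (['#'] <+: d.drop q) ↔ d[q] = '#' := by
  rw [List.drop_eq_getElem_cons hq]
  constructor
  · rintro ⟨r, hr⟩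
    simp only [List.singleton_append, List.cons.injEq] at hr
    exact hr.1.symm
  · intro h
    exact ⟨d.drop (q+1), by simp [h]⟩

theorem pvMem_take_iff (d : List Char) (i : Nat) :
    '#' ∈ d.take i ↔ 0 ≤ PySem.Chars.find d ['#'] ∧ (PySem.Chars.find d ['#']).toNat < i := by
  constructor
  · intro hm
    have hmem : '#' ∈ d := List.mem_of_mem_take hm
    have h0 : 0 ≤ PySem.Chars.find d ['#'] := by
      rw [PySem.Chars.find_nonneg_iff]
      obtain ⟨s, t, rfl⟩ := List.append_of_mem hmem
      exact ⟨s, t, by simp⟩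
    refine ⟨h0, ?_⟩
    obtain ⟨-, hmin⟩ := PySem.Chars.find_spec (s := d) (sub := ['#']) h0
    rw [List.mem_iff_getElem] at hm
    obtain ⟨q, hq, hval⟩ := hm
    have hqd : q < d.length := by
      have := hq
      simp at this
      omega
    have hdq : d[q] = '#' := by
      rw [List.getElem_take] at hval
      exact hval
    by_contra hlt
    have hqi : q < i := by
      have := hq; simp at this; omega
    have : q < (PySem.Chars.find d ['#']).toNat := by omega
    exact hmin q this ((pvPrefix_drop d q hqd).mpr hdq)
  · rintro ⟨h0, hlt⟩
    obtain ⟨hpre, -⟩ := PySem.Chars.find_spec (s := d) (sub := ['#']) h0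
    have hFn : (PySem.Chars.find d ['#']).toNat < d.length := by
      by_contra hge
      rw [List.drop_eq_nil_of_le (by omega)] at hpre
      simp at hpre
    have hdF : d[(PySem.Chars.find d ['#']).toNat] = '#' := (pvPrefix_drop d _ hFn).mp hpre
    rw [List.mem_iff_getElem]
    refine ⟨(PySem.Chars.find d ['#']).toNat, by simp; omega, ?_⟩
    rw [List.getElem_take]
    exact hdF

theorem pvALoop_append (d : List Char) (info : List Int) (l1 l2 : List Nat)
    (h : ∀ i ∈ l1, PySem.Chars.isIn ['#'] (d.take i) = false) :
    pvALoop d info (l1 ++ l2) = l1.filterMap (pvStepA d info) ++ pvALoop d info l2 := by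
  induction l1 with
  | nil => simp
  | cons i rest ih =>
    have hbr : ¬ (PySem.Chars.isIn ['#'] (d.take i) = true) := by
      rw [h i List.mem_cons_self]; simp
    simp only [List.cons_append, pvALoop, if_neg hbr, List.filterMap_cons, pvStepA]
    split <;> rename_i hfit <;>
      rw [ih (fun j hj => h j (List.mem_cons_of_mem _ hj))] <;>
      simp [pvStepA]

theorem pvGetD_map (f : Char → Char) (l : List Char) (p : Nat) (hp : p < l.length) :
    (l.map f).getD p ' ' = f (l.getD p ' ') := by
  simp [List.getD_eq_getElem?_getD, List.getElem?_map, List.getElem?_eq_getElem hp]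

theorem pvGetD_drop (l : List Char) (i q : Nat) :
    (l.drop i).getD q ' ' = l.getD (i + q) ' ' := by
  simp [List.getD_eq_getElem?_getD, List.getElem?_drop]

-- pointwise agreement of the two loop bodies
theorem pvStep_eq (d : List Char) (h : Int) (t : List Int) (hk : 0 ≤ h) (i : Nat)
    (hi : i < d.length) :
    pvStepA d (h :: t) i =
      pvStepB d (h :: t) h
        (List.scanl (fun a c => a + (if c = '.' then 1 else 0)) (0 : Nat) d) i := by
  set n := d.length with hn
  set K := h.toNat with hK
  have hKh : (K : Int) = h := Int.toNat_of_nonneg hk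
  set temp := pvMutLoop d i 0 d K with htemp
  set temp2 := temp.map (fun c => if c = '?' then '.' else c) with htemp2
  have hmutlen : temp.length = n := pvMutLoop_length d i K 0 d
  have hlen2 : temp2.length = n := by simp [htemp2, hmutlen]
  have htg : ∀ p, p < n → temp.getD p ' ' =
      (if i ≤ p ∧ p < i + K ∧ d.getD p ' ' = '?' then '#' else d.getD p ' ') := by
    intro p hp
    rw [htemp, pvMutLoop_getD d i K 0 d rfl p]
    by_cases hc : i ≤ p ∧ p < i + K ∧ d.getD p ' ' = '?'
    · obtain ⟨hc1, hc2, hc3⟩ := hc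
      rw [if_pos ⟨by omega, by omega, by omega, hc3⟩, if_pos ⟨hc1, hc2, hc3⟩]
    · rw [if_neg (by rintro ⟨a, b, c, e⟩; exact hc ⟨by omega, by omega, e⟩), if_neg hc]
  have ht2g : ∀ p, p < n → temp2.getD p ' ' =
      (if (if i ≤ p ∧ p < i + K ∧ d.getD p ' ' = '?' then '#' else d.getD p ' ') = '?'
       then '.' else (if i ≤ p ∧ p < i + K ∧ d.getD p ' ' = '?' then '#' else d.getD p ' ')) := by
    intro p hp
    rw [htemp2, pvGetD_map _ _ p (by omega), htg p hp]
  -- the common condition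
  set P : Prop := ((i : Int) + h ≤ n) ∧ (∀ q < K, d.getD (i + q) ' ' ≠ '.') ∧
      ((i : Int) + h = n ∨ d.getD (i + K) ' ' ≠ '#') with hP
  set d' := temp2.drop i with hd'
  have hd'len : d'.length = n - i := by simp [hd', hlen2]
  have hdotA : ∀ q, q < K → i + q < n → (d'.getD q ' ' = '.' ↔ d.getD (i + q) ' ' = '.') := by
    intro q hq hqn
    rw [hd', pvGetD_drop, ht2g (i + q) hqn]
    by_cases hv : d.getD (i + q) ' ' = '?'
    · rw [show (if i ≤ i + q ∧ i + q < i + K ∧ d.getD (i + q) ' ' = '?' then '#'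
            else d.getD (i + q) ' ') = '#' from if_pos ⟨by omega, by omega, hv⟩]
      rw [if_neg (by decide : ¬('#' = '?'))]
      constructor
      · intro hcon; exact absurd hcon (by decide)
      · intro hcon; rw [hcon] at hv; exact absurd hv (by decide)
    · rw [show (if i ≤ i + q ∧ i + q < i + K ∧ d.getD (i + q) ' ' = '?' then '#'
            else d.getD (i + q) ' ') = d.getD (i + q) ' ' from
          if_neg (by rintro ⟨-, -, e⟩; exact hv e)]
      rw [if_neg hv]
  have hbndA : i + K < n → (d'.getD K ' ' = '#' ↔ d.getD (i + K) ' ' = '#') := by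
    intro hKn
    rw [hd', pvGetD_drop, ht2g (i + K) hKn]
    rw [show (if i ≤ i + K ∧ i + K < i + K ∧ d.getD (i + K) ' ' = '?' then '#'
          else d.getD (i + K) ' ') = d.getD (i + K) ' ' from if_neg (by rintro ⟨-, b, -⟩; omega)]
    by_cases hv : d.getD (i + K) ' ' = '?'
    · rw [if_pos hv]
      constructor
      · intro hcon; exact absurd hcon (by decide)
      · intro hcon; rw [hcon] at hv; exact absurd hv (by decide)
    · rw [if_neg hv]
  -- A's condition equals P
  have hA : (pvIsFit d' (h :: t) = true) ↔ P := by
    simp only [pvIsFit, PySem.List.pyGet?_zero_cons, Option.getD_some]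
    by_cases h1 : h > (d'.length : Int)
    · rw [if_pos h1]
      simp only [Bool.false_eq_true, false_iff, hP]
      rintro ⟨hle, -, -⟩
      rw [hd'len] at h1
      omega
    · rw [if_neg h1]
      rw [hd'len] at h1
      have hle : (i : Int) + h ≤ n := by omega
      have hKn : i + K ≤ n := by omega
      by_cases h2 : pvFitLoop d' 0 K = false
      · rw [if_pos h2]
        simp only [Bool.false_eq_true, false_iff, hP]
        rintro ⟨-, hq, -⟩
        have : pvFitLoop d' 0 K = true := by
          rw [pvFitLoop_iff]
          intro q hqK
          rw [show 0 + q = q by omega]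
          rw [ne_eq, hdotA q hqK (by omega)]
          exact hq q hqK
        rw [this] at h2
        exact absurd h2 (by decide)
      · rw [if_neg h2]
        have hq : ∀ q < K, d.getD (i + q) ' ' ≠ '.' := by
          intro q hqK
          have h2' : pvFitLoop d' 0 K = true := by
            cases hv : pvFitLoop d' 0 K
            · exact absurd hv h2
            · rfl
          rw [pvFitLoop_iff] at h2'
          have := h2' q hqK
          rw [show 0 + q = q by omega] at this
          rw [ne_eq, ← hdotA q hqK (by omega)]
          exact this
        by_cases h3 : (d'.length : Int) = h
        · rw [if_pos h3]
          simp only [true_iff, hP]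
          rw [hd'len] at h3
          exact ⟨hle, hq, Or.inl (by omega)⟩
        · rw [if_neg h3]
          rw [hd'len] at h3
          have hKlt : i + K < n := by omega
          by_cases h4 : d'.getD K ' ' = '#'
          · rw [if_pos h4]
            simp only [Bool.false_eq_true, false_iff, hP]
            rintro ⟨-, -, hor⟩
            rcases hor with hor | hor
            · omega
            · exact hor ((hbndA hKlt).mp h4)
          · rw [if_neg h4]
            simp only [true_iff, hP]
            refine ⟨hle, hq, Or.inr ?_⟩
            rw [ne_eq, ← hbndA hKlt]
            exact h4
  -- B's condition equals P
  set dots := List.scanl (fun a c => a + (if c = '.' then 1 else 0)) (0 : Nat) d with hdots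
  have hB : (((i : Int) + h ≤ (n : Int)) ∧
      dots.getD ((i : Int) + h).toNat 0 = dots.getD i 0 ∧
      ((i : Int) + h = (n : Int) ∨ d.getD ((i : Int) + h).toNat ' ' ≠ '#')) ↔ P := by
    by_cases h1 : (i : Int) + h ≤ (n : Int)
    · have he : ((i : Int) + h).toNat = i + K := by omega
      have hKn : i + K ≤ n := by omega
      rw [he]
      constructor
      · rintro ⟨-, hdeq, hor⟩
        rw [hdots, pvScanl_getD d 0 (i + K) hKn, pvScanl_getD d 0 i (by omega)] at hdeq
        rw [hP]
        refine ⟨h1, ?_, hor⟩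
        intro q hqK
        have := (pvCount_take_iff d i K hKn).mp (by omega)
        exact fun hcon => (this q hqK) (by simpa using hcon)
      · rw [hP]
        rintro ⟨-, hq, hor⟩
        refine ⟨h1, ?_, hor⟩
        rw [hdots, pvScanl_getD d 0 (i + K) hKn, pvScanl_getD d 0 i (by omega)]
        have := (pvCount_take_iff d i K hKn).mpr hq
        omega
    · constructor
      · rintro ⟨hc, -, -⟩; exact absurd hc h1
      · rw [hP]; rintro ⟨hc, -, -⟩; exact absurd hc h1
  -- assemble
  simp only [pvStepA, pvStepB, PySem.List.pyGet?_zero_cons, Option.getD_some, List.tail_cons]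
  by_cases hp : P
  · rw [if_pos (by rw [← htemp, ← htemp2, ← hd']; exact hA.mpr hp), if_pos (hB.mpr hp)]
    have hsl : PySem.List.slice d (some ((i : Int) + h + 1)) none = d.drop ((i : Int) + h + 1).toNat :=
      PySem.List.slice_from d (by omega)
    rw [hsl]
  · rw [if_neg (fun hc => hp (hA.mp (by rw [← htemp, ← htemp2, ← hd'] at hc; exact hc))),
        if_neg (fun hc => hp (hB.mp hc))]


-- ===== VERDICT (by name: the statement is the Claim_ definition above) =====
theorem get_all_valid_pos_spec : Claim_equal_get_all_valid_pos := by
  intro data info hdom hpre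
  obtain ⟨hne, hnn⟩ := hpre
  unfold Spec_get_all_valid_pos
  cases info with
  | nil => exact absurd rfl hne
  | cons h t =>
  have hk : 0 ≤ h := by simpa using hnn
  simp only [get_all_valid_pos, get_all_valid_pos_alt, PySem.List.pyGet?_zero_cons,
    Option.getD_some, List.tail_cons]
  set d := data.toList with hd
  set n := d.length with hn
  have hfind : PySem.Str.find data "#" = PySem.Chars.find d ['#'] := by
    rw [hd]; simp
  rw [hfind]
  set F := PySem.Chars.find d ['#'] with hF
  set limit : Int := if F = -1 then (n : Int) - 1 else F with hlimit
  set m := (limit + 1).toNat with hm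
  have hFtop : 0 ≤ F → (F.toNat < n ∧ m = F.toNat + 1) := by
    intro h0
    have hmemd : '#' ∈ d := by
      have hinf : ['#'] <:+: d := (PySem.Chars.find_nonneg_iff d ['#']).mp h0
      obtain ⟨s, t2, hst⟩ := hinf
      rw [← hst]; simp
    have hmem : '#' ∈ d.take n := by
      rw [hn, List.take_length]; exact hmemd
    have h2 := (pvMem_take_iff d n).mp hmem
    refine ⟨h2.2, ?_⟩
    rw [hm, hlimit, if_neg (by omega)]
    omega
  have hmn : m ≤ n := by
    by_cases h0 : 0 ≤ F
    · have := hFtop h0; omega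
    · have hFe : F = -1 := by
        have := PySem.Chars.neg_one_le_find (s := d) (sub := ['#'])
        omega
      rw [hm, hlimit, if_pos hFe]; omega
  have hnb : ∀ i ∈ List.range m, PySem.Chars.isIn ['#'] (d.take i) = false := by
    intro i hi
    rw [List.mem_range] at hi
    cases hb : PySem.Chars.isIn ['#'] (d.take i)
    · rfl
    · exfalso
      have hmem := (pvIsIn_singleton _ _).mp hb
      have h2 := (pvMem_take_iff d i).mp hmem
      by_cases h0 : 0 ≤ F
      · have h3 := hFtop h0; omega
      · omega
  have hsplit : List.range n = List.range m ++ (List.range (n - m)).map (m + ·) := by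
    conv_lhs => rw [show n = m + (n - m) from by omega]
    exact List.range_add
  have hAside : pvALoop d (h :: t) (List.range n) = (List.range m).filterMap (pvStepA d (h :: t)) := by
    rw [hsplit, pvALoop_append d (h :: t) _ _ hnb]
    rcases hcase : n - m with _ | c
    · simp [pvALoop]
    · rw [List.range_succ_eq_map]
      simp only [List.map_cons]
      have hmlt : m < n := by omega
      have h0 : 0 ≤ F := by
        by_contra hneg
        have hFe : F = -1 := by
          have := PySem.Chars.neg_one_le_find (s := d) (sub := ['#'])
          omega
        have : m = n := by rw [hm, hlimit, if_pos hFe]; omega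
        omega
      have h3 := hFtop h0
      have hbm : PySem.Chars.isIn ['#'] (d.take (m + 0)) = true :=
        (pvIsIn_singleton _ _).mpr ((pvMem_take_iff d (m + 0)).mpr ⟨h0, by omega⟩)
      simp only [pvALoop, if_pos hbm, List.append_nil]
  rw [hAside]
  exact List.filterMap_congr fun i hi =>
    pvStep_eq d h t hk i (lt_of_lt_of_le (List.mem_range.mp hi) hmn)
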